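-- pv_equiv track=rewrite | github.com/ArfanisP/Image-Analysis | src/solver_mbm.py | layout_component
-- ===== SOURCE A (Python) =====
-- from collections import deque, defaultdict
--
-- def layout_component(adj, root):
--     """
--     Ανάθεση ακέραιων μετατοπίσεων (r,c) στους κόμβους με BFS.
--     """
--     placement = {root: (0,0)}
--     q = deque([root])
--     conflicts = 0
--
--     while q:
--         u = q.popleft()
--         ur, uc = placement[u]
--         for v, (dr, dc), _ in adj[u]:
--             vr, vc = ur + dr, uc + dc
--             if v not in placement:
--                 placement[v] = (vr, vc)
--                 q.append(v)
--             else: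
--                 if placement[v] != (vr, vc):
--                     conflicts += 1
--     return placement, conflicts
-- ===== SOURCE B (Python) =====
-- from collections import deque
--
-- def layout_component(adj, root):
--     # Same BFS placement, but conflicts are counted in a separate second pass
--     # over the final placement (placements are never overwritten, so the count
--     # against the final placement equals A's incremental count).
--     placement = {root: (0, 0)}
--     q = deque([root])
--     while q:
--         u = q.popleft()
--         ur, uc = placement[u]
--         for v, (dr, dc), _ in adj[u]:
--             if v not in placement:
--                 placement[v] = (ur + dr, uc + dc)
--                 q.append(v)
--     conflicts = 0
--     for u, (ur, uc) in placement.items():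
--         for v, (dr, dc), _ in adj[u]:
--             if placement[v] != (ur + dr, uc + dc):
--                 conflicts += 1
--     return placement, conflicts
-- ===== Notes on version B (the rewrite author's own statement) =====
-- stated objective: alternative
-- what changed: B's BFS loop only assigns placements; the conflict count is computed afterwards in a separate second pass over the final placement (valid because placements are never overwritten), instead of A's interleaved counting inside the BFS.
import Mathlib
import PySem

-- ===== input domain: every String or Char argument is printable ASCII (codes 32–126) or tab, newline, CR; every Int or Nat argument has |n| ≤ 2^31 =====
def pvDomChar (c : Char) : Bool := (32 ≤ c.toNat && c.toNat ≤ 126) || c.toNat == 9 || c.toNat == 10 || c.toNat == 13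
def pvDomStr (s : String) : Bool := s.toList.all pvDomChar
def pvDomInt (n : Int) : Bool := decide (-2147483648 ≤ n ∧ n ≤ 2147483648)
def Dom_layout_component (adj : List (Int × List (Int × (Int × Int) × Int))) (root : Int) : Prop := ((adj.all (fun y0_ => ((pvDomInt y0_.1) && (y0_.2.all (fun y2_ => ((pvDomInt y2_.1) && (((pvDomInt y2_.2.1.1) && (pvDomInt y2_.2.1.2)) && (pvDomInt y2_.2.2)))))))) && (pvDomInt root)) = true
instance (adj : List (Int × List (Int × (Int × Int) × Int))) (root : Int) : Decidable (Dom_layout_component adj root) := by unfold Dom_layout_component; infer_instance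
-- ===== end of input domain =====

-- B strips the BFS loop to placement-assignment only and counts conflicts in a
-- separate second pass over the final placement (same return value; different
-- decomposition, objective: alternative).

-- ===== PORT A =====
-- the inner 'for v,(dr,dc),_ in adj[u]' loop of A (state: placement, queue, conflicts)
def aStep (p : PySem.Dict Int (Int × Int)) (q : List Int) (c : Int) (ur uc : Int)
    (nbrs : List (Int × (Int × Int) × Int)) :
    PySem.Dict Int (Int × Int) × List Int × Int :=
  nbrs.foldl (fun st e =>
    let vr := ur + e.2.1.1
    let vc := uc + e.2.1.2
    if st.1.contains e.1 = false then
      (st.1.insert e.1 (vr, vc), st.2.1 ++ [e.1], st.2.2)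
    else if st.1.get? e.1 ≠ some (vr, vc) then (st.1, st.2.1, st.2.2 + 1)
    else st) (p, q, c)

-- the 'while q' loop of A; fuel only totalizes (adj.length + 1 provably suffices)
def aLoop (adj : List (Int × List (Int × (Int × Int) × Int))) :
    Nat → PySem.Dict Int (Int × Int) → List Int → Int → PySem.Dict Int (Int × Int) × Int
  | 0, p, _, c => (p, c)
  | _ + 1, p, [], c => (p, c)
  | fuel + 1, p, u :: q, c =>
    match p.get? u, (PySem.Dict.mk adj).get? u with
    | some (ur, uc), some nbrs =>
      let st := aStep p q c ur uc nbrs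
      aLoop adj fuel st.1 st.2.1 st.2.2
    | _, _ => (p, c)  -- Python raises KeyError here; Pre_ excludes these inputs

def layout_component (adj : List (Int × List (Int × (Int × Int) × Int))) (root : Int) : (List (Int × Int × Int)) × Int :=
  let r := aLoop adj (adj.length + 1) (PySem.Dict.ofList [(root, ((0 : Int), (0 : Int)))]) [root] 0
  (r.1.items, r.2)

-- ===== PORT B =====
-- B's phase-1 inner loop: only assigns placements and extends the queue
def bStep (p : PySem.Dict Int (Int × Int)) (q : List Int) (ur uc : Int)
    (nbrs : List (Int × (Int × Int) × Int)) :
    PySem.Dict Int (Int × Int) × List Int :=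
  nbrs.foldl (fun st e =>
    if st.1.contains e.1 = false then
      (st.1.insert e.1 (ur + e.2.1.1, uc + e.2.1.2), st.2 ++ [e.1])
    else st) (p, q)

-- B's phase-1 'while q' loop (fuel only totalizes)
def bLoop (adj : List (Int × List (Int × (Int × Int) × Int))) :
    Nat → PySem.Dict Int (Int × Int) → List Int → PySem.Dict Int (Int × Int)
  | 0, p, _ => p
  | _ + 1, p, [] => p
  | fuel + 1, p, u :: q =>
    match p.get? u, (PySem.Dict.mk adj).get? u with
    | some (ur, uc), some nbrs =>
      let st := bStep p q ur uc nbrs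
      bLoop adj fuel st.1 st.2
    | _, _ => p  -- Python raises KeyError here; Pre_ excludes these inputs

-- B's phase-2 inner loop: conflicts of one placed node against the final placement
def rowFrom (P : PySem.Dict Int (Int × Int)) (ur uc : Int)
    (nbrs : List (Int × (Int × Int) × Int)) (c : Int) : Int :=
  nbrs.foldl (fun c e =>
    if P.get? e.1 ≠ some (ur + e.2.1.1, uc + e.2.1.2) then c + 1 else c) c

-- B's phase-2 outer loop over a (suffix of the) placement items list
def scanFrom (adj : List (Int × List (Int × (Int × Int) × Int)))
    (P : PySem.Dict Int (Int × Int)) (items : List (Int × Int × Int)) (c : Int) : Int :=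
  items.foldl (fun c it =>
    match (PySem.Dict.mk adj).get? it.1 with
    | some nbrs => rowFrom P it.2.1 it.2.2 nbrs c
    | none => c) c  -- none is Python's KeyError; Pre_ excludes it

def layout_component_alt (adj : List (Int × List (Int × (Int × Int) × Int))) (root : Int) : (List (Int × Int × Int)) × Int :=
  let P := bLoop adj (adj.length + 1) (PySem.Dict.ofList [(root, ((0 : Int), (0 : Int)))]) [root]
  (P.items, scanFrom adj P P.items 0)

-- ===== PRECONDITION & SPEC =====
-- decidable reachability from root (expansion only through nodes that are keys of adj,
-- using the first-match neighbour list, exactly as the BFS does)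
def expandR (adj : List (Int × List (Int × (Int × Int) × Int))) (R : Finset Int) : Finset Int :=
  adj.foldl (fun S kl =>
    if kl.1 ∈ R then S ∪ ((((PySem.Dict.mk adj).getD kl.1 []).map Prod.fst).toFinset) else S) ∅

def stepR (adj : List (Int × List (Int × (Int × Int) × Int))) (R : Finset Int) : Finset Int :=
  R ∪ expandR adj R

def reachF (adj : List (Int × List (Int × (Int × Int) × Int))) (root : Int) : Finset Int :=
  (stepR adj)^[adj.length + 1] {root}

-- Pre_ holds exactly on the inputs where A returns: A raises KeyError (so does B)
-- iff the root, or some node reachable from it, is not a key of adj.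
def Pre_layout_component (adj : List (Int × List (Int × (Int × Int) × Int))) (root : Int) : Prop :=
  root ∈ adj.map Prod.fst ∧ ∀ u ∈ reachF adj root, u ∈ adj.map Prod.fst
instance (adj : List (Int × List (Int × (Int × Int) × Int))) (root : Int) : Decidable (Pre_layout_component adj root) := by unfold Pre_layout_component; infer_instance

def pvWitness_layout_component : (List (Int × List (Int × (Int × Int) × Int))) × Int :=
  ([(0, [(1, (0, 1), 5), (1, (1, 0), 2)]), (1, [(0, (0, -1), 5)])], 0)

def Spec_layout_component (adj : List (Int × List (Int × (Int × Int) × Int))) (root : Int) (out : (List (Int × Int × Int)) × Int) : Prop := out = layout_component_alt adj root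
instance (adj : List (Int × List (Int × (Int × Int) × Int))) (root : Int) (out : (List (Int × Int × Int)) × Int) : Decidable (Spec_layout_component adj root out) := by unfold Spec_layout_component; infer_instance

-- ===== CLAIM (what is proved, stated in full; the proofs are below) =====
def Claim_equal_layout_component : Prop := ∀ (adj : List (Int × List (Int × (Int × Int) × Int))) (root : Int), Dom_layout_component adj root → Pre_layout_component adj root → Spec_layout_component adj root (layout_component adj root)

-- ===== LEMMAS AND PROOFS =====

-- generic facts about the guarded-union fold that defines expandR
theorem fgu_init_subset {α : Type} (p : α → Prop) [DecidablePred p] (N : α → Finset Int) :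
    ∀ (l : List α) (S : Finset Int),
      S ⊆ l.foldl (fun S a => if p a then S ∪ N a else S) S := by
  intro l
  induction l with
  | nil => intro S; exact Finset.Subset.refl S
  | cons a t ih =>
    intro S
    rw [List.foldl_cons]
    have h1 : S ⊆ (if p a then S ∪ N a else S) := by
      split_ifs
      · exact Finset.subset_union_left
      · exact Finset.Subset.refl S
    exact h1.trans (by
      have := ih (if p a then S ∪ N a else S)
      exact this)

theorem fgu_elem {α : Type} (p : α → Prop) [DecidablePred p] (N : α → Finset Int) :
    ∀ (l : List α) (S : Finset Int) (a : α), a ∈ l → p a →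
      N a ⊆ l.foldl (fun S a => if p a then S ∪ N a else S) S := by
  intro l
  induction l with
  | nil => intro S a ha; simp at ha
  | cons b t ih =>
    intro S a ha hp
    rw [List.foldl_cons]
    rcases List.mem_cons.mp ha with h | h
    · subst h
      have h1 : N a ⊆ (if p a then S ∪ N a else S) := by
        rw [if_pos hp]; exact Finset.subset_union_right
      exact h1.trans (fgu_init_subset p N t _)
    · exact ih _ a h hp

theorem fgu_congr {α : Type} (p q : α → Prop) [DecidablePred p] [DecidablePred q]
    (N : α → Finset Int) :
    ∀ (l : List α), (∀ a ∈ l, (p a ↔ q a)) → ∀ (S : Finset Int),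
      l.foldl (fun S a => if p a then S ∪ N a else S) S
        = l.foldl (fun S a => if q a then S ∪ N a else S) S := by
  intro l
  induction l with
  | nil => intro _ S; rfl
  | cons a t ih =>
    intro h S
    rw [List.foldl_cons, List.foldl_cons]
    have : (if p a then S ∪ N a else S) = (if q a then S ∪ N a else S) := by
      by_cases hp : p a
      · rw [if_pos hp, if_pos ((h a (by simp)).mp hp)]
      · rw [if_neg hp, if_neg (fun hq => hp ((h a (by simp)).mpr hq))]
    rw [this]
    exact ih (fun a ha => h a (by simp [ha])) _

-- expandR depends only on R ∩ keys
theorem expandR_congr (adj : List (Int × List (Int × (Int × Int) × Int))) (R S : Finset Int)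
    (h : R ∩ (adj.map Prod.fst).toFinset = S ∩ (adj.map Prod.fst).toFinset) :
    expandR adj R = expandR adj S := by
  unfold expandR
  apply fgu_congr
  intro kl hkl
  have hk : kl.1 ∈ (adj.map Prod.fst).toFinset := by
    rw [List.mem_toFinset]; exact List.mem_map.mpr ⟨kl, hkl, rfl⟩
  constructor
  · intro hr
    have : kl.1 ∈ S ∩ (adj.map Prod.fst).toFinset := h ▸ Finset.mem_inter.mpr ⟨hr, hk⟩
    exact (Finset.mem_inter.mp this).1
  · intro hs
    have : kl.1 ∈ R ∩ (adj.map Prod.fst).toFinset := h ▸ Finset.mem_inter.mpr ⟨hs, hk⟩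
    exact (Finset.mem_inter.mp this).1

theorem stepR_infl (adj : List (Int × List (Int × (Int × Int) × Int))) (R : Finset Int) :
    R ⊆ stepR adj R := Finset.subset_union_left

theorem iter_mono (adj : List (Int × List (Int × (Int × Int) × Int))) (x : Finset Int) :
    ∀ n : Nat, (stepR adj)^[n] x ⊆ (stepR adj)^[n + 1] x := by
  intro n
  rw [Function.iterate_succ_apply']
  exact stepR_infl adj _

theorem iter_chain (adj : List (Int × List (Int × (Int × Int) × Int))) (x : Finset Int) :
    ∀ m n : Nat, m ≤ n → (stepR adj)^[m] x ⊆ (stepR adj)^[n] x := by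
  intro m n h
  induction n with
  | zero => have : m = 0 := by omega
            subst this; exact Finset.Subset.refl _
  | succ k ih =>
    rcases Nat.lt_or_ge m (k + 1) with hlt | hge
    · exact (ih (by omega)).trans (iter_mono adj x k)
    · have : m = k + 1 := by omega
      subst this; exact Finset.Subset.refl _

-- the iterate adj.length + 1 reaches a fixpoint of stepR
theorem reach_fix (adj : List (Int × List (Int × (Int × Int) × Int))) (root : Int) :
    stepR adj (reachF adj root) = reachF adj root := by
  by_cases hex : ∃ n ≤ adj.length + 1, stepR adj ((stepR adj)^[n] ({root} : Finset Int)) = (stepR adj)^[n] ({root} : Finset Int)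
  · obtain ⟨n, hn, hfix⟩ := hex
    have hiter : reachF adj root = (stepR adj)^[n] ({root} : Finset Int) := by
      unfold reachF
      have : adj.length + 1 = (adj.length + 1 - n) + n := by omega
      rw [this, Function.iterate_add_apply]
      exact Function.iterate_fixed hfix _
    rw [hiter]; exact hfix
  · exfalso
    push Not at hex
    -- with no fixpoint up to L+1, each step adds a new key, |keys| of them would be needed
    have grow : ∀ n, n ≤ adj.length + 1 →
        n ≤ (((stepR adj)^[n] ({root} : Finset Int)) ∩ (adj.map Prod.fst).toFinset).card := by
      intro n
      induction n with
      | zero => intro _; exact Nat.zero_le _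
      | succ k ih =>
        intro hk
        have h1 := ih (by omega)
        have hssub : ((stepR adj)^[k] ({root} : Finset Int)) ∩ (adj.map Prod.fst).toFinset
            ⊂ ((stepR adj)^[k + 1] ({root} : Finset Int)) ∩ (adj.map Prod.fst).toFinset := by
          refine Finset.ssubset_iff_subset_ne.mpr ⟨Finset.inter_subset_inter_right (iter_mono adj _ k), ?_⟩
          intro heq
          apply hex (k + 1) hk
          have hcongr := expandR_congr adj ((stepR adj)^[k + 1] ({root} : Finset Int)) ((stepR adj)^[k] ({root} : Finset Int)) heq.symm
          have hsub2 : expandR adj ((stepR adj)^[k + 1] ({root} : Finset Int)) ⊆ (stepR adj)^[k + 1] ({root} : Finset Int) := by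
            rw [hcongr, Function.iterate_succ_apply']
            exact Finset.subset_union_right
          unfold stepR
          exact Finset.union_eq_left.mpr hsub2
        have := Finset.card_lt_card hssub
        omega
    have hL := grow (adj.length + 1) (le_refl _)
    have hcard : (((stepR adj)^[adj.length + 1] ({root} : Finset Int)) ∩ (adj.map Prod.fst).toFinset).card
        ≤ (adj.map Prod.fst).toFinset.card := Finset.card_le_card Finset.inter_subset_right
    have hK : (adj.map Prod.fst).toFinset.card ≤ adj.length := by
      have := List.toFinset_card_le (adj.map Prod.fst)
      rwa [List.length_map] at this
    omega

theorem root_mem_reach (adj : List (Int × List (Int × (Int × Int) × Int))) (root : Int) :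
    root ∈ reachF adj root := by
  have h0 : root ∈ ((stepR adj)^[0] ({root} : Finset Int)) := by simp
  exact iter_chain adj {root} 0 (adj.length + 1) (by omega) h0

-- neighbours (first-match list) of a reachable key are reachable
theorem reach_closed (adj : List (Int × List (Int × (Int × Int) × Int))) (root : Int)
    (u : Int) (nbrs : List (Int × (Int × Int) × Int))
    (hget : (PySem.Dict.mk adj).get? u = some nbrs) (hu : u ∈ reachF adj root) :
    ∀ e ∈ nbrs, e.1 ∈ reachF adj root := by
  intro e he
  have hmem : (u, nbrs) ∈ adj := PySem.Dict.mem_items_of_get?_eq_some _ hget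
  have hgetD : (PySem.Dict.mk adj).getD u [] = nbrs := by
    simp [PySem.Dict.getD, hget]
  have hsub := fgu_elem (fun kl : Int × List (Int × (Int × Int) × Int) => kl.1 ∈ reachF adj root)
    (fun kl => (((PySem.Dict.mk adj).getD kl.1 []).map Prod.fst).toFinset) adj ∅ (u, nbrs) hmem hu
  have he1 : e.1 ∈ ((((PySem.Dict.mk adj).getD u []).map Prod.fst).toFinset : Finset Int) := by
    rw [List.mem_toFinset, hgetD]
    exact List.mem_map.mpr ⟨e, he, rfl⟩
  have : e.1 ∈ expandR adj (reachF adj root) := by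
    unfold expandR
    exact hsub he1
  rw [← reach_fix adj root]
  exact Finset.mem_union_right _ this

-- first-match lookup in an items list only sees the left part when the key is there
theorem get?_mk_append_left (l r : List (Int × (Int × Int))) (x : Int)
    (h : x ∈ l.map Prod.fst) :
    (PySem.Dict.mk (l ++ r)).get? x = (PySem.Dict.mk l).get? x := by
  induction l with
  | nil => simp at h
  | cons a t ih =>
    rw [List.cons_append, PySem.Dict.get?_mk_cons, PySem.Dict.get?_mk_cons]
    by_cases hx : a.1 = x
    · simp [hx]
    · simp only [List.map_cons, List.mem_cons] at h
      simp [beq_iff_eq, hx, ih (h.resolve_left (by intro hh; exact hx hh.symm))]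

theorem get?_mk_append_right (l r : List (Int × (Int × Int))) (x : Int)
    (h : x ∉ l.map Prod.fst) :
    (PySem.Dict.mk (l ++ r)).get? x = (PySem.Dict.mk r).get? x := by
  induction l with
  | nil => rfl
  | cons a t ih =>
    simp only [List.map_cons, List.mem_cons, not_or] at h
    rw [List.cons_append, PySem.Dict.get?_mk_cons]
    simp [beq_iff_eq, Ne.symm h.1, ih h.2]

theorem insert_mk_fresh (l : List (Int × (Int × Int))) (k : Int) (v : Int × Int)
    (h : k ∉ l.map Prod.fst) :
    (PySem.Dict.mk l).insert k v = PySem.Dict.mk (l ++ [(k, v)]) := by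
  have hc : (PySem.Dict.mk l).contains k = false := by
    rw [PySem.Dict.contains_eq_decide_mem_keys]; simp [PySem.Dict.keys, h]
  apply PySem.Dict.ext
  rw [PySem.Dict.items_insert, hc]
  rfl

theorem contains_mk_iff (l : List (Int × (Int × Int))) (k : Int) :
    (PySem.Dict.mk l).contains k = true ↔ k ∈ l.map Prod.fst := by
  rw [PySem.Dict.contains_eq_decide_mem_keys]; simp [PySem.Dict.keys]

theorem get?_mk_of_mem (l : List (Int × (Int × Int))) (x : Int) (pos : Int × Int)
    (hnd : (l.map Prod.fst).Nodup) (hm : (x, pos) ∈ l) :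
    (PySem.Dict.mk l).get? x = some pos :=
  PySem.Dict.get?_of_mem_items _ hm (by simpa [PySem.Dict.keys] using hnd)

-- conflict row counts agree for two dicts that agree on all neighbor targets
theorem rowFrom_congr (P P' : PySem.Dict Int (Int × Int)) (ur uc : Int)
    (nbrs : List (Int × (Int × Int) × Int))
    (h : ∀ v ∈ nbrs.map Prod.fst, P.get? v = P'.get? v) :
    ∀ c, rowFrom P ur uc nbrs c = rowFrom P' ur uc nbrs c := by
  induction nbrs with
  | nil => intro c; rfl
  | cons e rest ih =>
    intro c
    simp only [rowFrom, List.foldl_cons]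
    rw [h e.1 (by simp)]
    exact ih (fun v hv => h v (by simp [hv])) _

-- one BFS round: A's inner fold and B's inner fold produce the same placement/queue
-- extension Δ, and A's conflict increment is the row count against ANY dict that
-- extends p ++ Δ (placements are never overwritten)
theorem inner_decomp (ur uc : Int) :
    ∀ (nbrs : List (Int × (Int × Int) × Int)) (p : List (Int × (Int × Int)))
      (q : List Int) (c : Int), ((p.map Prod.fst).Nodup) →
    ∃ Δ : List (Int × (Int × Int)),
      (Δ.map Prod.fst).Nodup ∧
      (∀ k ∈ Δ.map Prod.fst, k ∉ p.map Prod.fst) ∧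
      (∀ k ∈ Δ.map Prod.fst, k ∈ nbrs.map Prod.fst) ∧
      (∀ v ∈ nbrs.map Prod.fst, v ∈ (p ++ Δ).map Prod.fst) ∧
      aStep (PySem.Dict.mk p) q c ur uc nbrs
        = (PySem.Dict.mk (p ++ Δ), q ++ Δ.map Prod.fst,
           rowFrom (PySem.Dict.mk (p ++ Δ)) ur uc nbrs c) ∧
      bStep (PySem.Dict.mk p) q ur uc nbrs
        = (PySem.Dict.mk (p ++ Δ), q ++ Δ.map Prod.fst) := by
  intro nbrs
  induction nbrs with
  | nil =>
    intro p q c hnd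
    exact ⟨[], by simp, by simp, by simp, by simp, by simp [aStep, rowFrom], by simp [bStep]⟩
  | cons e rest ih =>
    intro p q c hnd
    by_cases hv : e.1 ∈ p.map Prod.fst
    · -- already placed: dict and queue unchanged, conflict test against p
      have hcont : (PySem.Dict.mk p).contains e.1 = true := (contains_mk_iff p e.1).mpr hv
      set c' : Int := if (PySem.Dict.mk p).get? e.1 ≠ some (ur + e.2.1.1, uc + e.2.1.2)
        then c + 1 else c with hc'
      obtain ⟨Δ, h1, h2, h3, h4, hA, hB⟩ := ih p q c' hnd
      refine ⟨Δ, h1, h2, fun k hk => by simp [h3 k hk], ?_, ?_, ?_⟩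
      · intro v hvm
        rw [List.map_cons, List.mem_cons] at hvm
        rcases hvm with h | h
        · subst h; simp [hv]
        · exact h4 v h
      · have : aStep (PySem.Dict.mk p) q c ur uc (e :: rest)
            = aStep (PySem.Dict.mk p) q c' ur uc rest := by
          simp only [aStep, List.foldl_cons, hcont]
          rw [if_neg (show ¬(true = false) by simp), hc']
          split_ifs <;> rfl
        rw [this, hA]
        have hge : (PySem.Dict.mk (p ++ Δ)).get? e.1 = (PySem.Dict.mk p).get? e.1 :=
          get?_mk_append_left p Δ e.1 hv
        simp only [rowFrom, List.foldl_cons, hge, ← hc']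
      · have : bStep (PySem.Dict.mk p) q ur uc (e :: rest)
            = bStep (PySem.Dict.mk p) q ur uc rest := by
          simp only [bStep, List.foldl_cons, hcont]
          rw [if_neg (show ¬(true = false) by simp)]
        rw [this, hB]
    · -- fresh: insert and enqueue, no conflict possible for this edge
      have hcont : (PySem.Dict.mk p).contains e.1 = false := by
        rcases Bool.eq_false_or_eq_true ((PySem.Dict.mk p).contains e.1) with h | h
        · exact absurd ((contains_mk_iff p e.1).mp h) hv
        · exact h
      have hins := insert_mk_fresh p e.1 (ur + e.2.1.1, uc + e.2.1.2) hv
      have hnd' : (((p ++ [(e.1, (ur + e.2.1.1, uc + e.2.1.2))]).map Prod.fst)).Nodup := by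
        rw [List.map_append, List.nodup_append]
        refine ⟨hnd, by simp, ?_⟩
        intro a ha b hb
        have hb' : b = e.1 := by simpa using hb
        subst hb'
        intro heq
        exact hv (heq ▸ ha)
      obtain ⟨Δ', h1, h2, h3, h4, hA, hB⟩ := ih (p ++ [(e.1, (ur + e.2.1.1, uc + e.2.1.2))]) (q ++ [e.1]) c hnd'
      have hassoc : (p ++ [(e.1, (ur + e.2.1.1, uc + e.2.1.2))]) ++ Δ'
          = p ++ ((e.1, (ur + e.2.1.1, uc + e.2.1.2)) :: Δ') := by simp
      have hv_get : (PySem.Dict.mk (p ++ ((e.1, (ur + e.2.1.1, uc + e.2.1.2)) :: Δ'))).get? e.1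
          = some (ur + e.2.1.1, uc + e.2.1.2) := by
        rw [get?_mk_append_right p _ e.1 hv, PySem.Dict.get?_mk_cons]
        simp
      refine ⟨(e.1, (ur + e.2.1.1, uc + e.2.1.2)) :: Δ', ?_, ?_, ?_, ?_, ?_, ?_⟩
      · simp only [List.map_cons, List.nodup_cons]
        exact ⟨fun hk => h2 e.1 hk (by simp), h1⟩
      · intro k hk
        rw [List.map_cons, List.mem_cons] at hk
        rcases hk with h | h
        · subst h; exact hv
        · intro hkp; exact h2 k h (by simp [hkp])
      · intro k hk
        rw [List.map_cons, List.mem_cons] at hk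
        rcases hk with h | h
        · simp [h]
        · simp [h3 k h]
      · intro v hvm
        rw [List.map_cons, List.mem_cons] at hvm
        rcases hvm with h | h
        · subst h; simp
        · have := h4 v h
          simpa [hassoc] using this
      · have hstep : aStep (PySem.Dict.mk p) q c ur uc (e :: rest)
            = aStep (PySem.Dict.mk (p ++ [(e.1, (ur + e.2.1.1, uc + e.2.1.2))])) (q ++ [e.1]) c ur uc rest := by
          simp only [aStep, List.foldl_cons, hcont]
          rw [if_pos trivial, hins]
        rw [hstep, hA, hassoc]
        have hrow : rowFrom (PySem.Dict.mk (p ++ ((e.1, (ur + e.2.1.1, uc + e.2.1.2)) :: Δ'))) ur uc (e :: rest) c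
            = rowFrom (PySem.Dict.mk (p ++ ((e.1, (ur + e.2.1.1, uc + e.2.1.2)) :: Δ'))) ur uc rest c := by
          simp only [rowFrom, List.foldl_cons, hv_get]
          simp
        rw [hrow]
        simp
      · have hstep : bStep (PySem.Dict.mk p) q ur uc (e :: rest)
            = bStep (PySem.Dict.mk (p ++ [(e.1, (ur + e.2.1.1, uc + e.2.1.2))])) (q ++ [e.1]) ur uc rest := by
          simp only [bStep, List.foldl_cons, hcont]
          rw [if_pos trivial, hins]
        rw [hstep, hB, hassoc]
        simp

-- the main invariant: A's loop returns B's final placement together with the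
-- second-pass conflict scan over the not-yet-popped suffix of the final items list
theorem main_loop (adj : List (Int × List (Int × (Int × Int) × Int))) (R : Finset Int)
    (hclosed : ∀ u nbrs, (PySem.Dict.mk adj).get? u = some nbrs → u ∈ R → ∀ e ∈ nbrs, e.1 ∈ R)
    (hkeys : ∀ u ∈ R, u ∈ adj.map Prod.fst) :
    ∀ (fuel : Nat) (done pend : List (Int × (Int × Int))) (c : Int),
    (((done ++ pend).map Prod.fst).Nodup) →
    (∀ k ∈ (done ++ pend).map Prod.fst, k ∈ R) →
    (pend.length + ((adj.map Prod.fst).toFinset \ (((done ++ pend).map Prod.fst).toFinset)).card ≤ fuel) →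
    (∃ rest, (bLoop adj fuel (PySem.Dict.mk (done ++ pend)) (pend.map Prod.fst)).items
        = (done ++ pend) ++ rest) ∧
    aLoop adj fuel (PySem.Dict.mk (done ++ pend)) (pend.map Prod.fst) c =
      (bLoop adj fuel (PySem.Dict.mk (done ++ pend)) (pend.map Prod.fst),
       scanFrom adj (bLoop adj fuel (PySem.Dict.mk (done ++ pend)) (pend.map Prod.fst))
         ((bLoop adj fuel (PySem.Dict.mk (done ++ pend)) (pend.map Prod.fst)).items.drop done.length) c) := by
  intro fuel
  induction fuel with
  | zero =>
    intro done pend c hnd hR hfuel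
    have hpend : pend = [] := by
      have : pend.length = 0 := by omega
      exact List.length_eq_zero_iff.mp this
    subst hpend
    refine ⟨⟨[], by simp [bLoop]⟩, ?_⟩
    simp [aLoop, bLoop, scanFrom, List.drop_length]
  | succ fuel ih =>
    intro done pend c hnd hR hfuel
    match pend with
    | [] =>
      refine ⟨⟨[], by simp [bLoop]⟩, ?_⟩
      simp [aLoop, bLoop, scanFrom, List.drop_length]
    | (u, ur, uc) :: pend' =>
      have hmemp : (u, (ur, uc)) ∈ done ++ ((u, (ur, uc)) :: pend') := by simp
      have hget_p : (PySem.Dict.mk (done ++ ((u, (ur, uc)) :: pend'))).get? u = some (ur, uc) :=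
        get?_mk_of_mem _ u (ur, uc) hnd hmemp
      have hu_R : u ∈ R := hR u (by simp)
      have hu_adj : u ∈ adj.map Prod.fst := hkeys u hu_R
      obtain ⟨nbrs, hget_adj⟩ : ∃ nbrs, (PySem.Dict.mk adj).get? u = some nbrs := by
        rcases h : (PySem.Dict.mk adj).get? u with _ | nbrs
        · rw [PySem.Dict.get?_eq_none_iff_not_mem_keys] at h
          exact absurd (by simpa [PySem.Dict.keys] using hu_adj) h
        · exact ⟨nbrs, rfl⟩
      obtain ⟨Δ, h1, h2, h3, h4, hA, hB⟩ :=
        inner_decomp ur uc nbrs (done ++ ((u, (ur, uc)) :: pend')) (pend'.map Prod.fst) c hnd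
      have hΔR : ∀ k ∈ Δ.map Prod.fst, k ∈ R := by
        intro k hk
        obtain ⟨e, he, hek⟩ := List.mem_map.mp (h3 k hk)
        exact hek ▸ hclosed u nbrs hget_adj hu_R e he
      -- reassociate: (done ++ (u :: pend')) ++ Δ = (done ++ [u]) ++ (pend' ++ Δ)
      have hre : (done ++ ((u, (ur, uc)) :: pend')) ++ Δ
          = (done ++ [(u, (ur, uc))]) ++ (pend' ++ Δ) := by simp
      have hnd₂ : (((done ++ [(u, (ur, uc))]) ++ (pend' ++ Δ)).map Prod.fst).Nodup := by
        rw [← hre, List.map_append]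
        exact List.Nodup.append hnd h1 (fun a ha ha' => h2 a ha' ha)
      have hR₂ : ∀ k ∈ ((done ++ [(u, (ur, uc))]) ++ (pend' ++ Δ)).map Prod.fst, k ∈ R := by
        rw [← hre]
        intro k hk
        rw [List.map_append, List.mem_append] at hk
        exact hk.elim (hR k) (hΔR k)
      have hfuel₂ : (pend' ++ Δ).length +
          ((adj.map Prod.fst).toFinset \ ((((done ++ [(u, (ur, uc))]) ++ (pend' ++ Δ)).map Prod.fst).toFinset)).card ≤ fuel := by
        have hΔadj : ∀ k ∈ Δ.map Prod.fst, k ∈ adj.map Prod.fst := fun k hk => hkeys k (hΔR k hk)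
        have hΔsub : ((Δ.map Prod.fst).toFinset : Finset Int) ⊆
            (adj.map Prod.fst).toFinset \ (((done ++ ((u, (ur, uc)) :: pend')).map Prod.fst).toFinset) := by
          intro k hk
          rw [List.mem_toFinset] at hk
          rw [Finset.mem_sdiff, List.mem_toFinset, List.mem_toFinset]
          exact ⟨hΔadj k hk, h2 k hk⟩
        have hsd : (adj.map Prod.fst).toFinset \ ((((done ++ [(u, (ur, uc))]) ++ (pend' ++ Δ)).map Prod.fst).toFinset)
            = ((adj.map Prod.fst).toFinset \ (((done ++ ((u, (ur, uc)) :: pend')).map Prod.fst).toFinset)) \ (Δ.map Prod.fst).toFinset := by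
          rw [← hre]
          ext a
          simp only [Finset.mem_sdiff, List.mem_toFinset, List.map_append, List.mem_append]
          tauto
        have hlenΔ : ((Δ.map Prod.fst).toFinset : Finset Int).card = Δ.length := by
          rw [List.toFinset_card_of_nodup h1, List.length_map]
        have hcard := Finset.card_le_card hΔsub
        have hcard2 : (((adj.map Prod.fst).toFinset \ (((done ++ ((u, (ur, uc)) :: pend')).map Prod.fst).toFinset)) \ ((Δ.map Prod.fst).toFinset : Finset Int)).card
            = ((adj.map Prod.fst).toFinset \ (((done ++ ((u, (ur, uc)) :: pend')).map Prod.fst).toFinset)).card - ((Δ.map Prod.fst).toFinset : Finset Int).card := by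
          rw [Finset.card_sdiff, Finset.inter_eq_left.mpr hΔsub]
        rw [hsd, hcard2, hlenΔ]
        rw [hlenΔ] at hcard
        simp only [List.length_append, List.length_cons] at hfuel ⊢
        omega
      obtain ⟨⟨rest, hrest⟩, hmain⟩ :=
        ih (done ++ [(u, (ur, uc))]) (pend' ++ Δ)
          (rowFrom (PySem.Dict.mk ((done ++ [(u, (ur, uc))]) ++ (pend' ++ Δ))) ur uc nbrs c)
          hnd₂ hR₂ hfuel₂
      -- one unfolding step of both loops, phrased in the ih's list shapes
      have hstepA : aLoop adj (fuel + 1) (PySem.Dict.mk (done ++ ((u, (ur, uc)) :: pend')))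
            (((u, (ur, uc)) :: pend').map Prod.fst) c
          = aLoop adj fuel (PySem.Dict.mk ((done ++ [(u, (ur, uc))]) ++ (pend' ++ Δ)))
            ((pend' ++ Δ).map Prod.fst)
            (rowFrom (PySem.Dict.mk ((done ++ [(u, (ur, uc))]) ++ (pend' ++ Δ))) ur uc nbrs c) := by
        simp only [List.map_cons, aLoop, hget_p, hget_adj]
        rw [hA, hre, List.map_append]
      have hstepB : bLoop adj (fuel + 1) (PySem.Dict.mk (done ++ ((u, (ur, uc)) :: pend')))
            (((u, (ur, uc)) :: pend').map Prod.fst)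
          = bLoop adj fuel (PySem.Dict.mk ((done ++ [(u, (ur, uc))]) ++ (pend' ++ Δ)))
            ((pend' ++ Δ).map Prod.fst) := by
        simp only [List.map_cons, bLoop, hget_p, hget_adj]
        rw [hB, hre, List.map_append]
      refine ⟨⟨Δ ++ rest, ?_⟩, ?_⟩
      · rw [hstepB, hrest]
        simp
      · rw [hstepA, hstepB, hmain]
        have hitems : (bLoop adj fuel (PySem.Dict.mk ((done ++ [(u, (ur, uc))]) ++ (pend' ++ Δ)))
              ((pend' ++ Δ).map Prod.fst)).items
            = done ++ ((u, (ur, uc)) :: (pend' ++ (Δ ++ rest))) := by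
          rw [hrest]; simp
        have hdrop1 : (bLoop adj fuel (PySem.Dict.mk ((done ++ [(u, (ur, uc))]) ++ (pend' ++ Δ)))
              ((pend' ++ Δ).map Prod.fst)).items.drop done.length
            = (u, (ur, uc)) :: (pend' ++ (Δ ++ rest)) := by
          rw [hitems, List.drop_left]
        have hdrop2 : (bLoop adj fuel (PySem.Dict.mk ((done ++ [(u, (ur, uc))]) ++ (pend' ++ Δ)))
              ((pend' ++ Δ).map Prod.fst)).items.drop (done ++ [(u, (ur, uc))]).length
            = pend' ++ (Δ ++ rest) := by
          rw [hrest]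
          have h5 : ((done ++ [(u, (ur, uc))]) ++ (pend' ++ Δ)) ++ rest
              = (done ++ [(u, (ur, uc))]) ++ (pend' ++ (Δ ++ rest)) := by simp
          rw [h5, List.drop_left]
        have hPeta : bLoop adj fuel (PySem.Dict.mk ((done ++ [(u, (ur, uc))]) ++ (pend' ++ Δ)))
              ((pend' ++ Δ).map Prod.fst)
            = PySem.Dict.mk (((done ++ [(u, (ur, uc))]) ++ (pend' ++ Δ)) ++ rest) := by
          apply PySem.Dict.ext
          exact hrest
        have hcnt : rowFrom (PySem.Dict.mk ((done ++ [(u, (ur, uc))]) ++ (pend' ++ Δ))) ur uc nbrs c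
            = rowFrom (bLoop adj fuel (PySem.Dict.mk ((done ++ [(u, (ur, uc))]) ++ (pend' ++ Δ)))
                ((pend' ++ Δ).map Prod.fst)) ur uc nbrs c := by
          refine rowFrom_congr _ _ ur uc nbrs ?_ c
          intro v hv
          rw [hPeta]
          refine (get?_mk_append_left _ rest v ?_).symm
          have := h4 v hv
          rw [hre] at this
          exact this
        rw [hdrop1, hdrop2, hcnt]
        simp only [scanFrom, List.foldl_cons, hget_adj]

-- ===== VERDICT (by name: the statement is the Claim_ definition above) =====
theorem layout_component_spec : Claim_equal_layout_component := by
  intro adj root _hdom hpre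
  unfold Spec_layout_component
  obtain ⟨hroot, hreach⟩ := hpre
  have h := main_loop adj (reachF adj root)
    (fun u nbrs hget hu => reach_closed adj root u nbrs hget hu)
    hreach
    (adj.length + 1) [] [(root, ((0 : Int), (0 : Int)))] 0
    (by simp)
    (by intro k hk; simp at hk; rw [hk]; exact root_mem_reach adj root)
    (by
      have h1 : (((adj.map Prod.fst).toFinset : Finset Int) \ ((([(root, ((0 : Int), (0 : Int)))] ++ []).map Prod.fst).toFinset)).card
          ≤ ((adj.map Prod.fst).toFinset : Finset Int).card := Finset.card_le_card Finset.sdiff_subset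
      have h2 : ((adj.map Prod.fst).toFinset : Finset Int).card ≤ (adj.map Prod.fst).length :=
        List.toFinset_card_le _
      rw [List.length_map] at h2
      simp only [List.nil_append, List.append_nil, List.length_cons, List.length_nil] at h1 ⊢
      omega)
  obtain ⟨⟨rest, hrest⟩, hmain⟩ := h
  simp only [List.nil_append, List.map_cons, List.map_nil] at hmain
  unfold layout_component layout_component_alt
  rw [show PySem.Dict.ofList [(root, ((0 : Int), (0 : Int)))]
      = PySem.Dict.mk [(root, ((0 : Int), (0 : Int)))] from rfl, hmain]
  simp
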